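-- pv_equiv track=rewrite | github.com/szefer-piotr/pd-check-factory | scripts/normalize_layout_output.py | page_from_bounding_regions
-- ===== SOURCE A (Python) =====
-- from typing import Any, Dict, List, Optional, Tuple
--
-- def page_from_bounding_regions(item: Dict[str, Any]) -> Tuple[Optional[int], Optional[int]]:
--     pages: List[int] = []
--     for br in item.get("boundingRegions", []) or []:
--         page = br.get("pageNumber")
--         if isinstance(page, int):
--             pages.append(page)
--     if not pages:
--         return None, None
--     return min(pages), max(pages)
-- ===== SOURCE B (Python) =====
-- from typing import Any, Dict, List, Optional, Tuple
--
-- def page_from_bounding_regions(item: Dict[str, Any]) -> Tuple[Optional[int], Optional[int]]: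
--     # Sort the valid page numbers once and read both extremes off the ends of the sorted list.
--     pages = sorted(
--         br.get("pageNumber")
--         for br in (item.get("boundingRegions", []) or [])
--         if isinstance(br.get("pageNumber"), int)
--     )
--     if not pages:
--         return None, None
--     return pages[0], pages[-1]
-- ===== Notes on version B (the rewrite author's own statement) =====
-- stated objective: alternative
-- what changed: Instead of reducing the collected pages with min() and max(), B sorts the valid page numbers once and reads both extremes off the two ends of the sorted list (pages[0], pages[-1]).
import Mathlib
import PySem

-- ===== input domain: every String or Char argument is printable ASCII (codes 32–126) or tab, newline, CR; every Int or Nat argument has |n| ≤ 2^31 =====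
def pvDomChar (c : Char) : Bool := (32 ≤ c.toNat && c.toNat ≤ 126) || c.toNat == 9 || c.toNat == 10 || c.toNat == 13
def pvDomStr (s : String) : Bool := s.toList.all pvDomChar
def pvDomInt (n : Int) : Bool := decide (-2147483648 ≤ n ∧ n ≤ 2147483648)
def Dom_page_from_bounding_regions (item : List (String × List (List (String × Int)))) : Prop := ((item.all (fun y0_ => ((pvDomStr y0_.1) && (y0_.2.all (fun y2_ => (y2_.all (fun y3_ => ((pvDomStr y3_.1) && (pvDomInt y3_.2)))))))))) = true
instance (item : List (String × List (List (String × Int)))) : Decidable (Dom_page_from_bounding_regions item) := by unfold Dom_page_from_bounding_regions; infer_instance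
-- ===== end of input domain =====

-- B sorts the valid page numbers once and reads both extremes off the ends of the sorted
-- list, instead of A's collect-then-min()-and-max(): an alternative strategy, similar cost.
-- ===== PORT A =====
def page_from_bounding_regions (item : List (String × List (List (String × Int)))) : Option Int × Option Int :=
  let pages : List Int :=
    (PySem.Dict.getD (PySem.Dict.mk item) "boundingRegions" []).foldl
      (fun acc br =>
        match PySem.Dict.get? (PySem.Dict.mk br) "pageNumber" with
        | some p => acc ++ [p]       -- pages.append(page); isinstance(page, int) always holds under the type convention
        | none => acc) []
  if pages = [] then (none, none)
  else (PySem.List.min? pages (fun x => x), PySem.List.max? pages (fun x => x))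

-- ===== PORT B =====
-- br.get("pageNumber") kept when it is an int: under the type convention, the comprehension's filter is 'the key is present'
def pvPage (br : List (String × Int)) : Option Int := PySem.Dict.get? (PySem.Dict.mk br) "pageNumber"

def page_from_bounding_regions_alt (item : List (String × List (List (String × Int)))) : Option Int × Option Int :=
  let pages : List Int :=
    PySem.List.sorted ((PySem.Dict.getD (PySem.Dict.mk item) "boundingRegions" []).filterMap pvPage) (fun x => x)
  if pages = [] then (none, none)
  else (PySem.List.pyGet? pages 0, PySem.List.pyGet? pages (-1))

-- ===== PRECONDITION & SPEC =====
def Spec_page_from_bounding_regions (item : List (String × List (List (String × Int)))) (out : Option Int × Option Int) : Prop := out = page_from_bounding_regions_alt item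
instance (item : List (String × List (List (String × Int)))) (out : Option Int × Option Int) : Decidable (Spec_page_from_bounding_regions item out) := by unfold Spec_page_from_bounding_regions; infer_instance

-- ===== CLAIM (what is proved, stated in full; the proofs are below) =====
def Claim_equal_page_from_bounding_regions : Prop := ∀ (item : List (String × List (List (String × Int)))), Dom_page_from_bounding_regions item → Spec_page_from_bounding_regions item (page_from_bounding_regions item)

-- ===== LEMMAS AND PROOFS =====

-- A's append-loop collects exactly the filterMap of the page lookups
theorem foldA_eq (l : List (List (String × Int))) (acc : List Int) :
    l.foldl (fun acc br => match PySem.Dict.get? (PySem.Dict.mk br) "pageNumber" with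
        | some p => acc ++ [p] | none => acc) acc = acc ++ l.filterMap pvPage := by
  induction l generalizing acc with
  | nil => simp
  | cons br t ih =>
    simp only [List.foldl_cons, List.filterMap_cons, pvPage]
    cases PySem.Dict.get? (PySem.Dict.mk br) "pageNumber" with
    | none => simpa using ih acc
    | some p => simpa using ih (acc ++ [p])

-- the last element of a ≤-pairwise list is an upper bound
theorem pairwise_le_getLast (l : List Int) (hp : l.Pairwise (· ≤ ·)) (h : l ≠ []) :
    ∀ y ∈ l, y ≤ l.getLast h := by
  induction l with
  | nil => simp at h
  | cons x t ih =>
    intro y hy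
    cases t with
    | nil => simp at hy; simp [hy]
    | cons a s =>
      rw [List.getLast_cons (by simp)]
      rcases List.mem_cons.mp hy with rfl | hyt
      · exact le_trans (List.rel_of_pairwise_cons hp (List.getLast_mem _)) le_rfl
      · exact ih (List.pairwise_cons.mp hp).2 (by simp) y hyt

theorem page_from_bounding_regions_spec : Claim_equal_page_from_bounding_regions := by
  intro item _
  unfold Spec_page_from_bounding_regions page_from_bounding_regions page_from_bounding_regions_alt
  rw [foldA_eq]
  simp only [List.nil_append]
  set l := (PySem.Dict.getD (PySem.Dict.mk item) "boundingRegions" []).filterMap pvPage with hl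
  cases hs : PySem.List.sorted l (fun x => x) with
  | nil =>
    have : l = [] := (PySem.List.sorted_eq_nil_iff l _ _).mp hs
    simp [this]
  | cons m t =>
    have hlne : l ≠ [] := by
      intro h; rw [h] at hs; simp [PySem.List.sorted] at hs
    have hperm : (PySem.List.sorted l (fun x => x)).Perm l := PySem.List.sorted_perm l _ _
    rw [if_neg hlne, if_neg (by simp)]
    have hmeml : ∀ y, y ∈ m :: t → y ∈ l := fun y hy => (hs ▸ hperm).mem_iff.mp hy
    have hmemback : ∀ y, y ∈ l → y ∈ m :: t := fun y hy => (hs ▸ hperm).mem_iff.mpr hy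
    rw [Prod.mk.injEq]
    refine ⟨?_, ?_⟩
    · -- min? l = head of sorted
      obtain ⟨m', hm'⟩ : ∃ m', PySem.List.min? l (fun x => x) = some m' := by
        cases hmo : PySem.List.min? l (fun x => x) with
        | none => exact absurd ((PySem.List.min?_eq_none_iff l _).mp hmo) hlne
        | some v => exact ⟨v, rfl⟩
      rw [hm', PySem.List.pyGet?_zero_cons]
      have h1 : m ≤ m' := PySem.List.key_head_sorted_le l (fun x => x) hs m' (PySem.List.min?_mem hm')
      have h2 : m' ≤ m := PySem.List.min?_isMin hm' m (hmeml m (by simp))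
      exact congrArg some (le_antisymm h2 h1)
    · -- max? l = last of sorted
      obtain ⟨M, hM⟩ : ∃ M, PySem.List.max? l (fun x => x) = some M := by
        cases hmo : PySem.List.max? l (fun x => x) with
        | none => exact absurd ((PySem.List.max?_eq_none_iff l _).mp hmo) hlne
        | some v => exact ⟨v, rfl⟩
      rw [hM, PySem.List.pyGet?_neg_one]
      have hpw : (m :: t).Pairwise (· ≤ ·) := by
        have := PySem.List.sorted_pairwise l (fun x => x); rw [hs] at this; exact this
      have hLne : (m :: t) ≠ [] := by simp
      have h1 : M ≤ (m :: t).getLast hLne :=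
        pairwise_le_getLast _ hpw hLne M (hmemback M (PySem.List.max?_mem hM))
      have h2 : (m :: t).getLast hLne ≤ M :=
        PySem.List.max?_isMax hM _ (hmeml _ (List.getLast_mem hLne))
      rw [List.getLast?_eq_some_getLast (h := hLne)]
      exact congrArg some (le_antisymm h1 h2)
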